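-- pv_equiv track=rewrite | github.com/Romain-Gerard/algo | packcombi.py | get_all_parts_B_from_A
-- ===== SOURCE A (Python) =====
-- def combine_dyn(lst, memo=None):
--     """
--     Génère toutes les combinaisons possibles de toutes les tailles à partir d'une liste.
--     """
--     if memo is None:
--         memo = {}
--
--     # Si la liste est vide, il n'y a qu'une seule combinaison : l'ensemble vide.
--     if len(lst) == 0:
--         return [[]]
--
--     # Si le résultat est déjà calculé, on le retourne depuis la mémoire.
--     lst_tuple = tuple(lst)
--     if lst_tuple in memo:
--         return memo[lst_tuple]
--
--     # Récurrence :
--     # On exclut le premier élément et génère les combinaisons du reste.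
--     combinaisons_sans_premier = combine_dyn(lst[1:], memo)
--     # On inclut le premier élément dans chaque combinaison du reste.
--     premier = lst[0]
--     combinaisons_avec_premier = [[premier] + combinaison for combinaison in combinaisons_sans_premier]
--     # On combine les deux ensembles de combinaisons.
--     result = combinaisons_sans_premier + combinaisons_avec_premier
--
--     memo[lst_tuple] = result
--
--     return result
--
-- def get_signable_inds(part):
--     """
--     Récupère la liste des indices des éléments qui ne sont pas les premiers de leur bloc et pas dans le bloc zéro.
--     """
--     liste_signable_inds = []
--     ind = 0
--     for i in range(len(part)):
--         for j in range(0, len(part[i])):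
--             if part[i][0] != 0 and part[i][j] != part[i][0]:
--                 liste_signable_inds.append(ind)
--             ind += 1
--     return liste_signable_inds
--
-- def convert_part_A_to_B(part_A, permu_signed_inds):
--     """
--     Convertit une partition de type A en une partition de type B en inversant le signe
--     aux indices spécifiés par permu_signed_inds.
--     """
--     ind = 0
--     part_B = []
--     for i in range(len(part_A)):
--         bloc = []
--         for j in range(0, len(part_A[i])):
--             if ind in permu_signed_inds:
--                 bloc.append(-part_A[i][j])
--             else:
--                 bloc.append(part_A[i][j])
--             ind += 1
--         part_B.append(bloc)
--     return part_B
--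
-- def get_all_parts_B_from_A(parts_A, complete = False):
--     """
--     Récupère toutes les partitions de type B à partir d'une liste de partitions de type A.
--     """
--     all_part_B = []
--     for part_A in parts_A:
--         # Trier la partition de type A selon la représentation d'Adler
--         #part_A = sort_partitions([part_A])[0]
--         # Récupérer la liste des indices signables
--         liste_signable_inds = get_signable_inds(part_A)
--         # Générer toutes les combinaisons d'indices signables
--         combinaisons = combine_dyn(liste_signable_inds)
--         for comb in combinaisons:
--             # Convertir la partition de type A en type B
--             part_B = convert_part_A_to_B(part_A, comb)
--             all_part_B.append(part_B)
--
--     if complete: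
--         all_part_B = complete_parts_B(all_part_B)
--
--     return all_part_B
--
-- def complete_parts_B(parts_B):
--     """
--     Complète les partitions de type B en ajoutant après charque bloc son bloc opposé.
--     """
--     all_part_B = []
--     for part_B in parts_B:
--         new_part = []
--         for bloc in part_B:
--             if 0 not in bloc:
--                 new_part.append([-x for x in bloc])
--                 new_part.append(bloc)
--             else:
--                 new_part.append(bloc + [-x for x in bloc if x != 0])
--         all_part_B.append(new_part)
--     return all_part_B
-- ===== SOURCE B (Python) =====
-- def get_all_parts_B_from_A(parts_A, complete = False):
--     """
--     Enumerate sign variants by binary counting over the signable positions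
--     (MSB = first signable position) instead of recursive subset enumeration.
--     """
--     out = []
--     for part_A in parts_A:
--         n = sum(1 for b in part_A for e in b if b[0] != 0 and e != b[0])
--         for m in range(1 << n):
--             k = n
--             part_B = []
--             for b in part_A:
--                 blk = []
--                 for e in b:
--                     if b[0] != 0 and e != b[0]:
--                         k -= 1
--                         blk.append(-e if (m >> k) & 1 else e)
--                     else:
--                         blk.append(e)
--                 part_B.append(blk)
--             out.append(part_B)
--     if complete:
--         out = [[blk for bloc in p for blk in
--                 (([-x for x in bloc], bloc) if 0 not in bloc
--                  else (bloc + [-x for x in bloc if x != 0],))]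
--                for p in out]
--     return out
-- ===== Notes on version B (the rewrite author's own statement) =====
-- stated objective: alternative
-- what changed: Replaces A's recursive memoized power-set enumeration of signable indices plus per-position membership tests with direct binary counting: for m in range(2**n) each sign pattern is read off the bits of m (first signable position = MSB), building each part_B in one pass.
import Mathlib
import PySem

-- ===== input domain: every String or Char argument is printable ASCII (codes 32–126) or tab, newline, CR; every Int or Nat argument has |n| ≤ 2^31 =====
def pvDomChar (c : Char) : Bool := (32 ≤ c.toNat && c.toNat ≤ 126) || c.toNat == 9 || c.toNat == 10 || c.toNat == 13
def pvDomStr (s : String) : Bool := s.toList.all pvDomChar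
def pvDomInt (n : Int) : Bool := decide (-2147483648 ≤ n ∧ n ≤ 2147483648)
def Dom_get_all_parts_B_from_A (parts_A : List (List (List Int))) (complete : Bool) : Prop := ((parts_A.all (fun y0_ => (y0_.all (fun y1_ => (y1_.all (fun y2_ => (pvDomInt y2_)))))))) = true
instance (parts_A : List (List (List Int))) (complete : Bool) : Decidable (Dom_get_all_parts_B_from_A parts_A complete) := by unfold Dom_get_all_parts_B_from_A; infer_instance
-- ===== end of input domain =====

-- B enumerates the sign variants by binary counting over the signable positions instead of
-- A's recursive power-set enumeration with per-position membership tests (objective: alternative).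

-- ===== PORT A =====
-- combine_dyn's memo dict is a pure cache (it only stores results the recursion would
-- recompute identically), so the port is the same recursion without the cache: same values.
def combine_dyn : List Int → List (List Int)
  | [] => [[]]
  | x :: rest =>
      let sans := combine_dyn rest
      sans ++ sans.map (fun c => x :: c)

-- inner loop of get_signable_inds (per block, threading the flat counter ind)
def gsiInner (first : Int) : List Int → Int → List Int
  | [], _ => []
  | e :: rest, ind =>
      (if first ≠ 0 ∧ e ≠ first then [ind] else []) ++ gsiInner first rest (ind + 1)

-- outer loop of get_signable_inds (part[i][0] is only read when the block is nonempty)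
def gsiOuter : List (List Int) → Int → List Int
  | [], _ => []
  | b :: bs, ind => gsiInner (b.headD 0) b ind ++ gsiOuter bs (ind + b.length)

-- inner loop of convert_part_A_to_B
def convInner (comb : List Int) : List Int → Int → List Int
  | [], _ => []
  | e :: rest, ind => (if ind ∈ comb then -e else e) :: convInner comb rest (ind + 1)

-- outer loop of convert_part_A_to_B
def convOuter (comb : List Int) : List (List Int) → Int → List (List Int)
  | [], _ => []
  | b :: bs, ind => convInner comb b ind :: convOuter comb bs (ind + b.length)

def complete_parts_B (parts_B : List (List (List Int))) : List (List (List Int)) :=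
  parts_B.map (fun p => p.flatMap (fun bloc =>
    if (0 : Int) ∈ bloc then [bloc ++ (bloc.filter (fun x => x ≠ 0)).map (fun x => -x)]
    else [bloc.map (fun x => -x), bloc]))

def get_all_parts_B_from_A (parts_A : List (List (List Int))) (complete : Bool) : List (List (List Int)) :=
  let all := parts_A.flatMap (fun pA =>
    (combine_dyn (gsiOuter pA 0)).map (fun comb => convOuter comb pA 0))
  if complete then complete_parts_B all else all

-- ===== PORT B =====
-- n = sum(1 for b in part_A for e in b if b[0] != 0 and e != b[0])
def cntSig (part : List (List Int)) : Nat :=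
  (part.map (fun b => b.countP (fun e => decide (b.headD 0 ≠ 0 ∧ e ≠ b.headD 0)))).sum

-- inner loop of B's builder: (m >> k) & 1 is Nat.testBit m k
def buildInner (m : Nat) (first : Int) : List Int → Nat → (List Int × Nat)
  | [], k => ([], k)
  | e :: rest, k =>
      if first ≠ 0 ∧ e ≠ first then
        let k' := k - 1
        let p := buildInner m first rest k'
        ((if m.testBit k' then -e else e) :: p.1, p.2)
      else
        let p := buildInner m first rest k
        (e :: p.1, p.2)

def buildOuter (m : Nat) : List (List Int) → Nat → (List (List Int) × Nat)
  | [], k => ([], k)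
  | b :: bs, k =>
      let p := buildInner m (b.headD 0) b k
      let q := buildOuter m bs p.2
      (p.1 :: q.1, q.2)

def get_all_parts_B_from_A_alt (parts_A : List (List (List Int))) (complete : Bool) : List (List (List Int)) :=
  let out := parts_A.flatMap (fun pA =>
    (List.range (2 ^ cntSig pA)).map (fun m => (buildOuter m pA (cntSig pA)).1))
  if complete then
    out.map (fun p => p.flatMap (fun bloc =>
      if (0 : Int) ∈ bloc then [bloc ++ (bloc.filter (fun x => x ≠ 0)).map (fun x => -x)]
      else [bloc.map (fun x => -x), bloc]))
  else out

-- ===== PRECONDITION & SPEC =====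
def Spec_get_all_parts_B_from_A (parts_A : List (List (List Int))) (complete : Bool) (out : List (List (List Int))) : Prop := out = get_all_parts_B_from_A_alt parts_A complete
instance (parts_A : List (List (List Int))) (complete : Bool) (out : List (List (List Int))) : Decidable (Spec_get_all_parts_B_from_A parts_A complete out) := by unfold Spec_get_all_parts_B_from_A; infer_instance

-- ===== CLAIM (what is proved, stated in full; the proofs are below) =====
def Claim_equal_get_all_parts_B_from_A : Prop := ∀ (parts_A : List (List (List Int))) (complete : Bool), Dom_get_all_parts_B_from_A parts_A complete → Spec_get_all_parts_B_from_A parts_A complete (get_all_parts_B_from_A parts_A complete)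

-- ===== LEMMAS AND PROOFS =====

-- proof-only intermediate: sign a part according to a boolean vector, consumed front-to-back
def fInner (first : Int) : List Int → List Bool → (List Int × List Bool)
  | [], bits => ([], bits)
  | e :: rest, bits =>
      if first ≠ 0 ∧ e ≠ first then
        match bits with
        | [] => let p := fInner first rest []; (e :: p.1, p.2)
        | bb :: bs => let p := fInner first rest bs; ((if bb then -e else e) :: p.1, p.2)
      else
        let p := fInner first rest bits; (e :: p.1, p.2)

def fOuter : List (List Int) → List Bool → (List (List Int) × List Bool)
  | [], bits => ([], bits)
  | b :: bs, bits =>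
      let p := fInner (b.headD 0) b bits
      let q := fOuter bs p.2
      (p.1 :: q.1, q.2)

-- all boolean vectors of length n, in binary-counting order (MSB first)
def allBoolVecs : Nat → List (List Bool)
  | 0 => [[]]
  | n + 1 => (allBoolVecs n).map (false :: ·) ++ (allBoolVecs n).map (true :: ·)

-- bits of m, MSB (bit k-1) first
def bitsOf (m : Nat) : Nat → List Bool
  | 0 => []
  | k + 1 => m.testBit k :: bitsOf m k

theorem gsiInner_bounds (first : Int) (b : List Int) :
    ∀ (ind : Int), ∀ x ∈ gsiInner first b ind, ind ≤ x ∧ x < ind + b.length := by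
  induction b with
  | nil => simp [gsiInner]
  | cons e rest ih =>
      intro ind x hx
      simp only [gsiInner, List.mem_append] at hx
      have hlen : (((e :: rest).length : Nat) : Int) = (rest.length : Int) + 1 := by
        simp only [List.length_cons]; push_cast; ring
      rcases hx with hx | hx
      · have hx' : x = ind := by split at hx <;> simp_all
        rw [hx', hlen]; omega
      · have := ih (ind + 1) x hx
        rw [hlen]; omega

theorem gsiOuter_lb (bs : List (List Int)) :
    ∀ (ind : Int), ∀ x ∈ gsiOuter bs ind, ind ≤ x := by
  induction bs with
  | nil => simp [gsiOuter]
  | cons b rest ih =>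
      intro ind x hx
      simp only [gsiOuter, List.mem_append] at hx
      rcases hx with hx | hx
      · exact (gsiInner_bounds _ _ _ x hx).1
      · have h1 := ih (ind + b.length) x hx
        have h0 : (0 : Int) ≤ (b.length : Int) := by positivity
        omega

theorem gsiInner_pairwise (first : Int) (b : List Int) :
    ∀ (ind : Int), (gsiInner first b ind).Pairwise (· < ·) := by
  induction b with
  | nil => simp [gsiInner]
  | cons e rest ih =>
      intro ind
      simp only [gsiInner]
      split
      · refine List.pairwise_append.2 ⟨by simp, ih _, ?_⟩
        intro x hx y hy
        have hx' : x = ind := by simpa using hx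
        have hy' := (gsiInner_bounds first rest (ind + 1) y hy).1
        omega
      · simpa using ih (ind + 1)

theorem gsiOuter_pairwise (bs : List (List Int)) :
    ∀ (ind : Int), (gsiOuter bs ind).Pairwise (· < ·) := by
  induction bs with
  | nil => simp [gsiOuter]
  | cons b rest ih =>
      intro ind
      refine List.pairwise_append.2 ⟨gsiInner_pairwise _ _ _, ih _, ?_⟩
      intro x hx y hy
      have h1 := (gsiInner_bounds _ _ _ x hx).2
      have h2 := gsiOuter_lb _ _ y hy
      omega

theorem gsiOuter_nodup (bs : List (List Int)) (ind : Int) : (gsiOuter bs ind).Nodup :=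
  (gsiOuter_pairwise bs ind).imp (fun h => by omega)

theorem combine_dyn_subset (L : List Int) :
    ∀ c ∈ combine_dyn L, ∀ x ∈ c, x ∈ L := by
  induction L with
  | nil => intro c hc; simp [combine_dyn] at hc; simp [hc]
  | cons a L ih =>
      intro c hc x hx
      simp only [combine_dyn, List.mem_append, List.mem_map] at hc
      rcases hc with hc | ⟨c', hc', rfl⟩
      · exact List.mem_cons_of_mem _ (ih c hc x hx)
      · rcases List.mem_cons.1 hx with rfl | hx
        · exact List.mem_cons_self
        · exact List.mem_cons_of_mem _ (ih c' hc' x hx)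

theorem charVec_combine (L : List Int) (h : L.Nodup) :
    (combine_dyn L).map (fun c => L.map (fun x => decide (x ∈ c))) = allBoolVecs L.length := by
  induction L with
  | nil => simp [combine_dyn, allBoolVecs]
  | cons a L ih =>
      have hnd := List.nodup_cons.1 h
      simp only [combine_dyn, List.map_append, List.map_map, List.length_cons, allBoolVecs]
      congr 1
      · rw [← ih hnd.2, List.map_map]
        apply List.map_congr_left
        intro c hc
        have hac : a ∉ c := fun hx => hnd.1 (combine_dyn_subset L c hc a hx)
        simp [Function.comp, hac]
      · rw [← ih hnd.2, List.map_map]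
        apply List.map_congr_left
        intro c hc
        simp only [Function.comp, List.map_cons]
        have hhead : decide (a ∈ a :: c) = true := by simp
        rw [hhead]
        congr 1
        apply List.map_congr_left
        intro y hy
        have hya : y ≠ a := fun hh => hnd.1 (hh ▸ hy)
        simp [List.mem_cons, hya]

-- conv = f on the characteristic vector of comb over the signable indices
theorem conv_eq_f_inner (first : Int) (b : List Int) :
    ∀ (ind : Int) (comb : List Int) (extra : List Bool),
    (∀ i : Int, ind ≤ i → i < ind + b.length → i ∈ comb → i ∈ gsiInner first b ind) →
    fInner first b ((gsiInner first b ind).map (fun x => decide (x ∈ comb)) ++ extra)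
      = (convInner comb b ind, extra) := by
  induction b with
  | nil => intro ind comb extra _; simp [gsiInner, fInner, convInner]
  | cons e rest ih =>
      intro ind comb extra hyp
      have hlen : ind + (((e :: rest).length : Nat) : Int) = (ind + 1) + (rest.length : Int) := by
        simp only [List.length_cons]; push_cast; ring
      by_cases hs : first ≠ 0 ∧ e ≠ first
      · simp only [gsiInner, if_pos hs, List.cons_append, List.nil_append, List.map_cons,
          fInner, convInner]
        rw [ih (ind + 1) comb extra ?_]
        · by_cases hm : ind ∈ comb <;> simp [hm]
        · intro i h1 h2 hic
          have hmem := hyp i (by omega) (by rw [hlen]; omega) hic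
          simp only [gsiInner, if_pos hs, List.cons_append, List.nil_append, List.mem_cons] at hmem
          rcases hmem with rfl | hin
          · omega
          · exact hin
      · have hind : ind ∉ comb := by
          intro hic
          have hmem := hyp ind (le_refl _) (by rw [hlen]; omega) hic
          simp only [gsiInner, if_neg hs, List.nil_append] at hmem
          have := (gsiInner_bounds first rest (ind + 1) ind hmem).1
          omega
        simp only [gsiInner, if_neg hs, List.nil_append, fInner, convInner, if_neg hind]
        rw [ih (ind + 1) comb extra ?_]
        intro i h1 h2 hic
        have hmem := hyp i (by omega) (by rw [hlen]; omega) hic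
        simpa only [gsiInner, if_neg hs, List.nil_append] using hmem

theorem conv_eq_f_outer (bs : List (List Int)) :
    ∀ (ind : Int) (comb : List Int) (extra : List Bool),
    (∀ i : Int, ind ≤ i → i ∈ comb → i ∈ gsiOuter bs ind) →
    fOuter bs ((gsiOuter bs ind).map (fun x => decide (x ∈ comb)) ++ extra)
      = (convOuter comb bs ind, extra) := by
  induction bs with
  | nil => intro ind comb extra _; simp [gsiOuter, fOuter, convOuter]
  | cons b rest ih =>
      intro ind comb extra hyp
      simp only [gsiOuter, List.map_append, List.append_assoc, fOuter, convOuter]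
      rw [conv_eq_f_inner (b.headD 0) b ind comb _ ?_]
      · rw [ih (ind + b.length) comb extra ?_]
        intro i h1 hic
        have h0 : (0 : Int) ≤ (b.length : Int) := by positivity
        have hmem := hyp i (by omega) hic
        simp only [gsiOuter, List.mem_append] at hmem
        rcases hmem with hin | hin
        · have := (gsiInner_bounds _ _ _ i hin).2; omega
        · exact hin
      · intro i h1 h2 hic
        have hmem := hyp i h1 hic
        simp only [gsiOuter, List.mem_append] at hmem
        rcases hmem with hin | hin
        · exact hin
        · have := gsiOuter_lb _ _ i hin; omega

theorem bitsOf_congr (a b : Nat) : ∀ (n : Nat), (∀ j, j < n → a.testBit j = b.testBit j) →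
    bitsOf a n = bitsOf b n := by
  intro n
  induction n with
  | zero => intro _; rfl
  | succ k ih =>
      intro h
      simp only [bitsOf]
      rw [h k (Nat.lt_succ_self k), ih (fun j hj => h j (Nat.lt_succ_of_lt hj))]

theorem range_bitsOf : ∀ (n : Nat),
    (List.range (2 ^ n)).map (fun m => bitsOf m n) = allBoolVecs n := by
  intro n
  induction n with
  | zero => simp [bitsOf, allBoolVecs]
  | succ n ih =>
      have hp : 2 ^ (n + 1) = 2 ^ n + 2 ^ n := by ring
      rw [hp, List.range_add, List.map_append, List.map_map]
      simp only [allBoolVecs]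
      congr 1
      · calc (List.range (2 ^ n)).map (fun m => bitsOf m (n + 1))
            = (List.range (2 ^ n)).map (fun m => false :: bitsOf m n) := by
              apply List.map_congr_left
              intro m hm
              have hm' := List.mem_range.1 hm
              simp only [bitsOf, Nat.testBit_lt_two_pow hm']
          _ = ((List.range (2 ^ n)).map (fun m => bitsOf m n)).map (false :: ·) := by
              rw [List.map_map]; rfl
          _ = (allBoolVecs n).map (false :: ·) := by rw [ih]
      · calc (List.range (2 ^ n)).map ((fun m => bitsOf m (n + 1)) ∘ (fun m => 2 ^ n + m))
            = (List.range (2 ^ n)).map (fun m => true :: bitsOf m n) := by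
              apply List.map_congr_left
              intro m hm
              have hm' := List.mem_range.1 hm
              simp only [Function.comp, bitsOf]
              congr 1
              · rw [Nat.testBit_two_pow_add_eq, Nat.testBit_lt_two_pow hm']; rfl
              · exact bitsOf_congr _ _ n (fun j hj => Nat.testBit_two_pow_add_gt hj m)
          _ = ((List.range (2 ^ n)).map (fun m => bitsOf m n)).map (true :: ·) := by
              rw [List.map_map]; rfl
          _ = (allBoolVecs n).map (true :: ·) := by rw [ih]

-- build = f on the bits of m
theorem build_eq_f_inner (m : Nat) (first : Int) :
    ∀ (b : List Int) (k : Nat),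
    buildInner m first b (b.countP (fun e => decide (first ≠ 0 ∧ e ≠ first)) + k)
      = ((fInner first b (bitsOf m (b.countP (fun e => decide (first ≠ 0 ∧ e ≠ first)) + k))).1, k) ∧
    (fInner first b (bitsOf m (b.countP (fun e => decide (first ≠ 0 ∧ e ≠ first)) + k))).2 = bitsOf m k := by
  intro b
  induction b with
  | nil => intro k; simp [buildInner, fInner, List.countP_nil]
  | cons e rest ih =>
      intro k
      obtain ⟨ih1, ih2⟩ := ih k
      by_cases hs : first ≠ 0 ∧ e ≠ first
      · have harg : (e :: rest).countP (fun x => decide (first ≠ 0 ∧ x ≠ first)) + k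
            = (rest.countP (fun x => decide (first ≠ 0 ∧ x ≠ first)) + k) + 1 := by
          simp [List.countP_cons, hs]; omega
        rw [harg]
        have hbits : bitsOf m ((rest.countP (fun x => decide (first ≠ 0 ∧ x ≠ first)) + k) + 1)
            = m.testBit (rest.countP (fun x => decide (first ≠ 0 ∧ x ≠ first)) + k)
              :: bitsOf m (rest.countP (fun x => decide (first ≠ 0 ∧ x ≠ first)) + k) := rfl
        rw [hbits]
        simp only [buildInner, fInner, if_pos hs, Nat.add_sub_cancel]
        rw [ih1]
        exact ⟨rfl, ih2⟩
      · have harg : (e :: rest).countP (fun x => decide (first ≠ 0 ∧ x ≠ first)) + k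
            = rest.countP (fun x => decide (first ≠ 0 ∧ x ≠ first)) + k := by
          simp [List.countP_cons, hs]
        rw [harg]
        simp only [buildInner, fInner, if_neg hs]
        rw [ih1]
        exact ⟨rfl, ih2⟩

theorem build_eq_f_outer (m : Nat) :
    ∀ (bs : List (List Int)) (k : Nat),
    buildOuter m bs (cntSig bs + k) = ((fOuter bs (bitsOf m (cntSig bs + k))).1, k) ∧
    (fOuter bs (bitsOf m (cntSig bs + k))).2 = bitsOf m k := by
  intro bs
  induction bs with
  | nil => intro k; simp [buildOuter, fOuter, cntSig]
  | cons b rest ih =>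
      intro k
      have hsplit : cntSig (b :: rest) + k
          = b.countP (fun e => decide (b.headD 0 ≠ 0 ∧ e ≠ b.headD 0)) + (cntSig rest + k) := by
        simp only [cntSig, List.map_cons, List.sum_cons]; omega
      rw [hsplit]
      obtain ⟨hi1, hi2⟩ := build_eq_f_inner m (b.headD 0) b (cntSig rest + k)
      obtain ⟨ho1, ho2⟩ := ih k
      simp only [buildOuter, fOuter]
      rw [hi1, hi2, ho1, ho2]
      exact ⟨rfl, rfl⟩

theorem cntInner_eq_len (first : Int) (b : List Int) :
    ∀ (ind : Int), b.countP (fun e => decide (first ≠ 0 ∧ e ≠ first)) = (gsiInner first b ind).length := by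
  induction b with
  | nil => intro ind; simp [gsiInner]
  | cons e rest ih =>
      intro ind
      simp only [gsiInner, List.countP_cons, List.length_append]
      rw [← ih (ind + 1)]
      by_cases hs : first ≠ 0 ∧ e ≠ first <;> simp [hs] <;> omega

theorem cnt_eq_len (bs : List (List Int)) :
    ∀ (ind : Int), cntSig bs = (gsiOuter bs ind).length := by
  induction bs with
  | nil => intro ind; simp [cntSig, gsiOuter]
  | cons b rest ih =>
      intro ind
      simp only [cntSig, List.map_cons, List.sum_cons, gsiOuter, List.length_append]
      rw [cntInner_eq_len (b.headD 0) b ind, ← ih (ind + b.length)]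
      rfl

theorem per_part (p : List (List Int)) :
    (combine_dyn (gsiOuter p 0)).map (fun comb => convOuter comb p 0)
      = (List.range (2 ^ cntSig p)).map (fun m => (buildOuter m p (cntSig p)).1) := by
  have hn : cntSig p = (gsiOuter p 0).length := cnt_eq_len p 0
  have hL : (combine_dyn (gsiOuter p 0)).map (fun comb => convOuter comb p 0)
      = (combine_dyn (gsiOuter p 0)).map
          (fun comb => (fOuter p ((gsiOuter p 0).map (fun x => decide (x ∈ comb)))).1) := by
    apply List.map_congr_left
    intro comb hc
    have h := conv_eq_f_outer p 0 comb [] (fun i _ hic => combine_dyn_subset _ comb hc i hic)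
    rw [List.append_nil] at h
    rw [h]
  have hR : (List.range (2 ^ cntSig p)).map (fun m => (buildOuter m p (cntSig p)).1)
      = (List.range (2 ^ cntSig p)).map (fun m => (fOuter p (bitsOf m (cntSig p))).1) := by
    apply List.map_congr_left
    intro m _
    have h := (build_eq_f_outer m p 0).1
    rw [Nat.add_zero] at h
    rw [h]
  rw [hL, hR]
  have h1 : (combine_dyn (gsiOuter p 0)).map
        (fun comb => (fOuter p ((gsiOuter p 0).map (fun x => decide (x ∈ comb)))).1)
      = ((combine_dyn (gsiOuter p 0)).map
          (fun comb => (gsiOuter p 0).map (fun x => decide (x ∈ comb)))).map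
          (fun v => (fOuter p v).1) := by
    rw [List.map_map]; rfl
  have h2 : (List.range (2 ^ cntSig p)).map (fun m => (fOuter p (bitsOf m (cntSig p))).1)
      = ((List.range (2 ^ cntSig p)).map (fun m => bitsOf m (cntSig p))).map
          (fun v => (fOuter p v).1) := by
    rw [List.map_map]; rfl
  rw [h1, h2, charVec_combine _ (gsiOuter_nodup p 0), hn, range_bitsOf]

-- ===== VERDICT (by name: the statement is the Claim_ definition above) =====
theorem get_all_parts_B_from_A_spec : Claim_equal_get_all_parts_B_from_A := by
  intro parts_A complete _
  unfold Spec_get_all_parts_B_from_A get_all_parts_B_from_A get_all_parts_B_from_A_alt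
  have h : parts_A.flatMap (fun pA =>
      (combine_dyn (gsiOuter pA 0)).map (fun comb => convOuter comb pA 0))
      = parts_A.flatMap (fun pA =>
      (List.range (2 ^ cntSig pA)).map (fun m => (buildOuter m pA (cntSig pA)).1)) :=
    List.flatMap_congr (fun pA _ => per_part pA)
  rw [h]
  cases complete <;> simp [complete_parts_B]
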